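-- pv_equiv track=rewrite | github.com/gportella/codewars_challenges | circular_genome_assembly/genome_assembly_olc.py | _trim_circular
-- ===== SOURCE A (Python) =====
-- def _trim_circular(sequence: str) -> str:
--     """Remove circular duplication from sequence."""
--     n = len(sequence)
--     if n == 0:
--         return sequence
--
--     # Use KMP failure function to find border
--     pi = [0] * n
--     j = 0
--     for i in range(1, n):
--         while j > 0 and sequence[i] != sequence[j]:
--             j = pi[j - 1]
--         if sequence[i] == sequence[j]:
--             j += 1
--         pi[i] = j
--
--     border = pi[-1]
--     if 0 < border < n:
--         return sequence[:-border]
--     return sequence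
-- ===== SOURCE B (Python) =====
-- def _trim_circular(sequence: str) -> str:
--     """Remove circular duplication from sequence."""
--     n = len(sequence)
--     # longest proper border: scan L from n-1 down; first match is the longest
--     for L in range(n - 1, 0, -1):
--         if sequence[n - L:] == sequence[:L]:
--             return sequence[:-L]
--     return sequence
-- ===== Notes on version B (the rewrite author's own statement) =====
-- stated objective: simpler
-- what changed: Replaces the KMP failure-function construction with a direct downward scan for the longest proper border (first L from n-1 down with prefix of length L equal to suffix of length L), then trims it.
import Mathlib
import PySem

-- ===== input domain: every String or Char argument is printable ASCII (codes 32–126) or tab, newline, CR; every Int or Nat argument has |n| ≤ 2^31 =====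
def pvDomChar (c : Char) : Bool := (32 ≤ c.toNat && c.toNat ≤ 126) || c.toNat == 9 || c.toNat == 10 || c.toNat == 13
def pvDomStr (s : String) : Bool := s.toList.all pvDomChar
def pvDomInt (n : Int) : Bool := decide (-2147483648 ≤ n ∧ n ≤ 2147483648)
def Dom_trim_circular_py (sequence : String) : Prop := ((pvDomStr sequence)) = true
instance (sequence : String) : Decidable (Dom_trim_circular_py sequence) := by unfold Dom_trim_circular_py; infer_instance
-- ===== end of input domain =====

-- B replaces the KMP failure-function construction by a direct downward scan for the
-- longest proper border (simpler, shorter; not claimed faster).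

-- ===== PORT A =====
-- the inner `while j > 0 and sequence[i] != sequence[j]: j = pi[j-1]`;
-- `fuel` is a totality guard (the chain j > pi[j-1] > … strictly decreases, so fuel = j suffices);
-- indices are always in range in A, so the getD defaults are never used
def kmpBack (s : List Char) (pi : List Nat) (c : Char) : Nat → Nat → Nat
  | 0, j => j
  | fuel + 1, j =>
      if 0 < j ∧ c ≠ s.getD j ' ' then kmpBack s pi c fuel (pi.getD (j - 1) 0) else j

-- one iteration of A's `for i in range(1, n)` body
def kmpStep (s : List Char) (st : List Nat × Nat) (i : Nat) : List Nat × Nat :=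
  let j0 := kmpBack s st.1 (s.getD i ' ') st.2 st.2
  let j1 := if s.getD i ' ' = s.getD j0 ' ' then j0 + 1 else j0
  (st.1.set i j1, j1)

def trim_circular_py (sequence : String) : String :=
  let s := sequence.toList
  let n := s.length
  if n = 0 then sequence
  else
    let st := (List.range' 1 (n - 1)).foldl (kmpStep s) (List.replicate n 0, 0)
    let border := st.1.getD (n - 1) 0
    if 0 < border ∧ border < n then String.ofList (s.take (n - border))  -- sequence[:-border], exact since 0 < border < n
    else sequence

-- ===== PORT B =====
-- the `for L in range(n-1, 0, -1)` loop with early return, as structural recursion on L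
def altLoop (s : List Char) (n : Nat) : Nat → Option Nat
  | 0 => none
  | L + 1 => if s.drop (n - (L + 1)) = s.take (L + 1) then some (L + 1) else altLoop s n L

def trim_circular_py_alt (sequence : String) : String :=
  let s := sequence.toList
  let n := s.length
  match altLoop s n (n - 1) with
  | some L => String.ofList (s.take (n - L))  -- sequence[:-L], exact since 0 < L < n
  | none => sequence

-- ===== PRECONDITION & SPEC =====
def Spec_trim_circular_py (sequence : String) (out : String) : Prop := out = trim_circular_py_alt sequence
instance (sequence : String) (out : String) : Decidable (Spec_trim_circular_py sequence out) := by unfold Spec_trim_circular_py; infer_instance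

-- ===== CLAIM (what is proved, stated in full; the proofs are below) =====
def Claim_equal_trim_circular_py : Prop := ∀ (sequence : String), Dom_trim_circular_py sequence → Spec_trim_circular_py sequence (trim_circular_py sequence)

-- ===== LEMMAS AND PROOFS =====

-- `Brd t k`: k is the length of a proper border of t (prefix of length k = suffix of length k)
abbrev Brd (t : List Char) (k : Nat) : Prop := k < t.length ∧ t.take k = t.drop (t.length - k)

-- `M t`: the longest proper border length of t (0 if none / t empty)
def M (t : List Char) : Nat := Nat.findGreatest (Brd t) (t.length - 1)

theorem brd_zero (t : List Char) (h : t ≠ []) : Brd t 0 :=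
  ⟨List.length_pos_of_ne_nil h, by simp⟩

theorem le_M (t : List Char) (k : Nat) (h : Brd t k) : k ≤ M t :=
  Nat.le_findGreatest (by have := h.1; omega) h

theorem M_brd (t : List Char) (h : t ≠ []) : Brd t (M t) :=
  Nat.findGreatest_spec (Nat.zero_le _) (brd_zero t h)

theorem M_lt (t : List Char) (h : t ≠ []) : M t < t.length := (M_brd t h).1

theorem M_eq (t : List Char) (k : Nat) (hk : Brd t k) (hmax : ∀ m, Brd t m → m ≤ k) :
    M t = k := by
  have h1 : k ≤ M t := le_M t k hk
  have ht : t ≠ [] := by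
    intro h; subst h; exact absurd hk.1 (by simp)
  have h2 : M t ≤ k := hmax _ (M_brd t ht)
  omega

theorem M_short (t : List Char) (h : t.length ≤ 1) : M t = 0 := by
  unfold M
  have : t.length - 1 = 0 := by omega
  rw [this, Nat.findGreatest_zero]

theorem getD_take (s : List Char) (i j : Nat) (h : j < i) :
    (s.take i).getD j ' ' = s.getD j ' ' := by
  simp [List.getD_eq_getElem?_getD, h]

theorem take_prefix_take (s : List Char) (i j : Nat) (h : j ≤ i) :
    (s.take i).take j = s.take j := by
  rw [List.take_take, min_eq_left h]

theorem take_succ_getD (s : List Char) (k : Nat) (h : k < s.length) :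
    s.take (k + 1) = s.take k ++ [s.getD k ' '] := by
  rw [List.take_add_one, List.getElem?_eq_getElem h]
  simp [List.getD_eq_getElem?_getD, List.getElem?_eq_getElem h]

theorem getD_set_self (l : List Nat) (i v : Nat) (h : i < l.length) :
    (l.set i v).getD i 0 = v := by
  simp [List.getD_eq_getElem?_getD, h]

theorem getD_set_ne (l : List Nat) (i j v : Nat) (h : i ≠ j) :
    (l.set i v).getD j 0 = l.getD j 0 := by
  simp [List.getD_eq_getElem?_getD, List.getElem?_set_ne h]

theorem brd_down (t : List Char) (a b : Nat) (ha : Brd t a) (hb : Brd t b) (hab : a < b) :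
    Brd (t.take b) a := by
  have hbl := hb.1
  constructor
  · rw [List.length_take]; omega
  · rw [take_prefix_take t b a (le_of_lt hab)]
    have hlen : (t.take b).length = b := by rw [List.length_take]; omega
    rw [hlen, hb.2, List.drop_drop, ha.2]
    congr 1
    omega

theorem brd_up (t : List Char) (a b : Nat) (hb : Brd t b) (ha : Brd (t.take b) a) : Brd t a := by
  have hbl := hb.1
  have hal := ha.1
  rw [List.length_take] at hal
  have hab : a < b := by omega
  constructor
  · omega
  · have h2 := ha.2
    rw [take_prefix_take t b a (le_of_lt hab)] at h2
    have hlen : (t.take b).length = b := by rw [List.length_take]; omega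
    rw [hlen, hb.2, List.drop_drop] at h2
    rw [h2]
    congr 1
    omega

theorem brd_snoc (t : List Char) (c : Char) (k : Nat) :
    Brd (t ++ [c]) (k + 1) ↔ Brd t k ∧ t.getD k ' ' = c := by
  by_cases hk : k < t.length
  · have hlen : (t ++ [c]).length = t.length + 1 := by simp
    constructor
    · rintro ⟨h1, h2⟩
      rw [hlen] at h1 h2
      have hd : t.length + 1 - (k + 1) = t.length - k := by omega
      rw [hd, List.take_append_of_le_length (by omega),
          List.drop_append_of_le_length (by omega), take_succ_getD t k hk] at h2
      have hlen2 : (t.take k).length = (t.drop (t.length - k)).length := by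
        simp; omega
      obtain ⟨e1, e2⟩ := List.append_inj h2 hlen2
      refine ⟨⟨hk, e1⟩, ?_⟩
      simpa using e2
    · rintro ⟨⟨h1, h2⟩, h3⟩
      refine ⟨by rw [hlen]; omega, ?_⟩
      rw [hlen]
      have hd : t.length + 1 - (k + 1) = t.length - k := by omega
      rw [hd, List.take_append_of_le_length (by omega),
          List.drop_append_of_le_length (by omega), take_succ_getD t k hk, h2, h3]
  · constructor
    · rintro ⟨h1, _⟩
      simp at h1
      omega
    · rintro ⟨⟨h1, _⟩, _⟩
      omega

-- the while loop: from a border j maximal among borders m with t[m] = c above it,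
-- it reaches the largest border that can be extended by c (or 0)
theorem kmpBack_spec (s : List Char) (pi : List Nat) (c : Char) (i : Nat)
    (hi : i ≤ s.length)
    (hpi : ∀ k, k < i → pi.getD k 0 = M (s.take (k + 1))) :
    ∀ fuel j, j ≤ fuel → Brd (s.take i) j →
      (∀ m, Brd (s.take i) m → j < m → (s.take i).getD m ' ' ≠ c) →
      Brd (s.take i) (kmpBack s pi c fuel j) ∧
      (∀ m, Brd (s.take i) m → kmpBack s pi c fuel j < m → (s.take i).getD m ' ' ≠ c) ∧
      (kmpBack s pi c fuel j = 0 ∨ c = s.getD (kmpBack s pi c fuel j) ' ') := by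
  intro fuel
  induction fuel with
  | zero =>
      intro j hj hB hmax
      have : j = 0 := by omega
      subst this
      exact ⟨hB, hmax, Or.inl rfl⟩
  | succ fuel ih =>
      intro j hj hB hmax
      have htlen : (s.take i).length = i := by rw [List.length_take]; omega
      by_cases hc : 0 < j ∧ c ≠ s.getD j ' '
      · rw [kmpBack, if_pos hc]
        obtain ⟨hc1, hc2⟩ := hc
        have hji : j < i := by have := hB.1; omega
        have hpij : pi.getD (j - 1) 0 = M (s.take j) := by
          have h1 : j - 1 + 1 = j := by omega
          have h2 := hpi (j - 1) (by omega)
          rwa [h1] at h2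
        have hTake : s.take j = (s.take i).take j := (take_prefix_take s i j (le_of_lt hji)).symm
        have hTne : (s.take i).take j ≠ [] := by
          have : ((s.take i).take j).length = j := by
            rw [List.length_take]; omega
          intro hnil
          rw [hnil] at this
          simp at this
          omega
        have hMlt : M ((s.take i).take j) < j := by
          have := M_lt ((s.take i).take j) hTne
          rwa [List.length_take, htlen, min_eq_left (le_of_lt hji)] at this
        rw [hpij, hTake]
        apply ih
        · omega
        · exact brd_up (s.take i) _ j hB (M_brd _ hTne)
        · intro m hm hlt
          rcases lt_trichotomy m j with h1 | h1 | h1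
          · exfalso
            have := le_M ((s.take i).take j) m (brd_down (s.take i) m j hm hB h1)
            omega
          · subst h1
            rw [getD_take s i m hji]
            exact fun he => hc2 he.symm
          · exact hmax m hm h1
      · rw [kmpBack, if_neg hc]
        rw [not_and_or, not_not, Nat.not_lt, Nat.le_zero] at hc
        refine ⟨hB, hmax, ?_⟩
        by_cases hj0 : j = 0
        · exact Or.inl hj0
        · exact Or.inr (hc.resolve_left hj0)

-- the for loop: after processing i = 1 .. m, pi[k] = M (s.take (k+1)) for k ≤ m and j = M (s.take (m+1))
theorem fold_spec (s : List Char) :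
    ∀ m, m + 1 ≤ s.length →
      ((List.range' 1 m).foldl (kmpStep s) (List.replicate s.length 0, 0)).1.length = s.length ∧
      (∀ k, k ≤ m →
        ((List.range' 1 m).foldl (kmpStep s) (List.replicate s.length 0, 0)).1.getD k 0
          = M (s.take (k + 1))) ∧
      ((List.range' 1 m).foldl (kmpStep s) (List.replicate s.length 0, 0)).2 = M (s.take (m + 1)) := by
  intro m
  induction m with
  | zero =>
      intro hm
      refine ⟨by simp, ?_, ?_⟩
      · intro k hk
        have hk0 : k = 0 := by omega
        subst hk0
        have h0 : 0 < s.length := by omega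
        rw [M_short (s.take 1) (by simp)]
        simp [List.getD_eq_getElem?_getD, h0]
      · simp [M_short (s.take 1) (by simp)]
  | succ m ih =>
      intro hm
      obtain ⟨ihlen, ihpi, ihj⟩ := ih (by omega)
      rw [List.range'_1_concat, List.foldl_append, List.foldl_cons, List.foldl_nil]
      rw [show 1 + m = m + 1 from Nat.add_comm 1 m]
      set st := (List.range' 1 m).foldl (kmpStep s) (List.replicate s.length 0, 0) with hst
      -- analyse one step at i = m + 1
      have hmlt : m + 1 < s.length := by omega
      set t := s.take (m + 1) with ht
      have htlen : t.length = m + 1 := by rw [ht, List.length_take]; omega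
      have htne : t ≠ [] := by
        intro h; rw [h] at htlen; simp at htlen
      set c := s.getD (m + 1) ' ' with hc
      have hback := kmpBack_spec s st.1 c (m + 1) (by omega)
        (fun k hk => ihpi k (by omega)) st.2 st.2 le_rfl
        (by rw [ihj]; exact M_brd t htne)
        (by
          intro m' hm' hlt
          rw [ihj] at hlt
          exact absurd (le_M t m' hm') (by omega))
      set jf := kmpBack s st.1 c st.2 st.2 with hjf
      obtain ⟨hBf, hmaxf, hexit⟩ := hback
      simp only [← ht] at hBf hmaxf hexit
      have hjflt : jf < m + 1 := by have := hBf.1; omega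
      have hgd : t.getD jf ' ' = s.getD jf ' ' := getD_take s (m + 1) jf hjflt
      have hsnoc : s.take (m + 1 + 1) = t ++ [c] := take_succ_getD s (m + 1) hmlt
      have hstep : kmpStep s st (m + 1) =
          (st.1.set (m + 1) (if c = s.getD jf ' ' then jf + 1 else jf),
           if c = s.getD jf ' ' then jf + 1 else jf) := rfl
      -- the new j is the longest border of s.take (m+2)
      have hM : (if c = s.getD jf ' ' then jf + 1 else jf) = M (s.take (m + 1 + 1)) := by
        rw [hsnoc]
        by_cases hceq : c = s.getD jf ' '
        · rw [if_pos hceq]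
          refine (M_eq (t ++ [c]) (jf + 1) ?_ ?_).symm
          · exact (brd_snoc t c jf).mpr ⟨hBf, by rw [hgd, ← hceq]⟩
          · intro m' hb'
            match m' with
            | 0 => omega
            | k + 1 =>
              obtain ⟨hbk, hck⟩ := (brd_snoc t c k).mp hb'
              by_contra hgt
              exact hmaxf k hbk (by omega) hck
        · rw [if_neg hceq]
          have hjf0 : jf = 0 := by
            rcases hexit with h | h
            · exact h
            · exact absurd h hceq
          refine (M_eq (t ++ [c]) jf ?_ ?_).symm
          · rw [hjf0]; exact brd_zero _ (by simp)
          · intro m' hb'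
            match m' with
            | 0 => omega
            | k + 1 =>
              obtain ⟨hbk, hck⟩ := (brd_snoc t c k).mp hb'
              by_cases hk0 : k = 0
              · subst hk0
                exfalso
                apply hceq
                rw [← hgd, ← hck, hjf0]
              · exfalso
                exact hmaxf k hbk (by omega) hck
      rw [hstep]
      refine ⟨by simpa using ihlen, ?_, hM⟩
      intro k hk
      by_cases hkm : k = m + 1
      · subst hkm
        rw [getD_set_self _ _ _ (by rw [ihlen]; omega), hM]
      · rw [getD_set_ne _ _ _ _ (fun h => hkm h.symm)]
        exact ihpi k (by omega)

-- B's downward scan computes the greatest border length ≤ m (none if only the trivial one)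
theorem altLoop_spec (s : List Char) :
    ∀ m, m < s.length →
      altLoop s s.length m =
        if Nat.findGreatest (Brd s) m = 0 then none else some (Nat.findGreatest (Brd s) m) := by
  intro m
  induction m with
  | zero => intro _; simp [altLoop]
  | succ m ih =>
      intro hm
      rw [altLoop, Nat.findGreatest_succ]
      by_cases hb : Brd s (m + 1)
      · rw [if_pos hb.2.symm, if_pos hb]
        simp
      · have hcond : ¬ (s.drop (s.length - (m + 1)) = s.take (m + 1)) := by
          intro h
          exact hb ⟨hm, h.symm⟩
        rw [if_neg hcond, if_neg hb]
        exact ih (by omega)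

-- ===== VERDICT (by name: the statement is the Claim_ definition above) =====
theorem trim_circular_py_spec : Claim_equal_trim_circular_py := by
  intro sequence _
  unfold Spec_trim_circular_py
  simp only [trim_circular_py, trim_circular_py_alt]
  set s := sequence.toList with hs
  by_cases hn : s.length = 0
  · rw [if_pos hn, hn]
    simp [altLoop]
  · rw [if_neg hn]
    have hn1 : 1 ≤ s.length := by omega
    obtain ⟨_, hpi, _⟩ := fold_spec s (s.length - 1) (by omega)
    have hborder :
        ((List.range' 1 (s.length - 1)).foldl (kmpStep s) (List.replicate s.length 0, 0)).1.getD
          (s.length - 1) 0 = M s := by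
      rw [hpi (s.length - 1) le_rfl]
      have : s.length - 1 + 1 = s.length := by omega
      rw [this, List.take_length]
    rw [hborder, altLoop_spec s (s.length - 1) (by omega)]
    have hMdef : Nat.findGreatest (Brd s) (s.length - 1) = M s := rfl
    rw [hMdef]
    by_cases hM0 : M s = 0
    · rw [if_pos hM0, hM0]
      simp
    · rw [if_neg hM0]
      have hlt : M s < s.length := M_lt s (by intro h; rw [h] at hn; simp at hn)
      rw [if_pos ⟨by omega, hlt⟩]
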